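-- pv_equiv track=rewrite | github.com/nayeonxkim/startcamp | 02_algorithm/ssafy/review/9489_ancient/sol.py | check_one
-- ===== SOURCE A (Python) =====
-- def check_one(arr):
--
--     # 행/열의 크기가 다르므로 N, M대신에 직접 len으로 길이구한다.
--     # N, M쓰면 전치행렬에서 error발생
--     max_point = 0
--     for i in range(len(arr)):
--         point = 0
--         for j in range(len(arr[i])):
--             # 1이면 point +1
--             if arr[i][j] == 1:
--                 point += 1
--                 # 기존 최대값보다 point가 커지면 갱신
--                 if max_point < point:
--                     max_point = point
--             # 0이면 point 0으로 리셋
--             else: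
--                 point = 0
--
--     return max_point
-- ===== SOURCE B (Python) =====
-- def _max_run(row):
--     # longest run of 1s: measure each maximal block of 1s as a whole and skip past it
--     best = 0
--     i = 0
--     n = len(row)
--     while i < n:
--         if row[i] == 1:
--             j = i
--             while j < n and row[j] == 1:
--                 j += 1
--             if j - i > best:
--                 best = j - i
--             i = j
--         else:
--             i += 1
--     return best
--
--
-- def check_one(arr):
--     best = 0
--     for row in arr:
--         best = max(best, _max_run(row))
--     return best
-- ===== Notes on version B (the rewrite author's own statement) =====
-- stated objective: alternative
-- what changed: Per row, B measures each maximal run of 1s as a whole block (measure prefix, skip past it) and folds max over per-row run maxima, instead of A's single running counter with inline max-updates and resets.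
import Mathlib
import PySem

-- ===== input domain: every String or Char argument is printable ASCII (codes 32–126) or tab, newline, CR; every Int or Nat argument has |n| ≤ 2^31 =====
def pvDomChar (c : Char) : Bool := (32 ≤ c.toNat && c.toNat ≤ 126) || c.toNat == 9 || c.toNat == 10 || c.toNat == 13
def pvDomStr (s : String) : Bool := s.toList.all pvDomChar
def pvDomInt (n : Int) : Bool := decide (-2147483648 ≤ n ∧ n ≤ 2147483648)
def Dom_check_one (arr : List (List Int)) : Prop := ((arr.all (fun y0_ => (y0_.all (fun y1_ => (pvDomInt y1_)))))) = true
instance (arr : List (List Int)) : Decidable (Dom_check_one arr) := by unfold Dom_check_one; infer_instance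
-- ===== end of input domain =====

-- B replaces A's running counter with whole-run measurement (measure each block of 1s, skip it, fold max); an alternative decomposition, same cost.


-- ===== PORT A =====
-- the inner-loop body: state (max_point, point)
def pvStepA (s : Int × Int) (x : Int) : Int × Int :=
  if x = 1 then
    let p := s.2 + 1
    (if s.1 < p then p else s.1, p)
  else (s.1, 0)

def check_one (arr : List (List Int)) : Int :=
  arr.foldl (fun max_point row => (row.foldl pvStepA (max_point, 0)).1) 0

-- ===== PORT B =====
-- _max_run: the pointer walk over row[i:] as structural recursion on the suffix;
-- the inner while measuring the block is `1 + takeWhile`, jumping i to j is `dropWhile`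
def pvMaxRun : List Int → Int
  | [] => 0
  | x :: xs =>
    if x = 1 then
      let runLen : Int := 1 + ((xs.takeWhile (· == 1)).length : Int)
      max runLen (pvMaxRun (xs.dropWhile (· == 1)))
    else pvMaxRun xs
termination_by l => l.length
decreasing_by
  · simpa [Nat.lt_succ_iff] using List.length_dropWhile_le (· == (1:Int)) xs
  · simp

def check_one_alt (arr : List (List Int)) : Int :=
  arr.foldl (fun best row => max best (pvMaxRun row)) 0

-- ===== PRECONDITION & SPEC =====
def Spec_check_one (arr : List (List Int)) (out : Int) : Prop := out = check_one_alt arr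
instance (arr : List (List Int)) (out : Int) : Decidable (Spec_check_one arr out) := by unfold Spec_check_one; infer_instance

-- ===== CLAIM (what is proved, stated in full; the proofs are below) =====
def Claim_equal_check_one : Prop := ∀ (arr : List (List Int)), Dom_check_one arr → Spec_check_one arr (check_one arr)

-- ===== LEMMAS AND PROOFS =====

-- suprema of the counter values at each increment, starting from counter p
def pvAux : List Int → Int → Int
  | [], _ => 0
  | x :: xs, p => if x = 1 then max (p + 1) (pvAux xs (p + 1)) else pvAux xs 0

lemma pvL1 : ∀ (row : List Int) (m p : Int), 0 ≤ m →
    (row.foldl pvStepA (m, p)).1 = max m (pvAux row p) := by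
  intro row
  induction row with
  | nil => intro m p hm; simp [pvAux, max_eq_left hm]
  | cons x xs ih =>
    intro m p hm
    by_cases hx : x = 1
    · have hstep : pvStepA (m, p) x = (max m (p + 1), p + 1) := by
        simp only [pvStepA, if_pos hx]
        have h : (if m < p + 1 then p + 1 else m) = max m (p + 1) := by split <;> omega
        rw [Prod.mk.injEq]
        exact ⟨h, rfl⟩
      simp only [List.foldl_cons, hstep]
      rw [ih _ _ (le_trans hm (le_max_left _ _))]
      simp [pvAux, hx, max_assoc]
    · simp only [List.foldl_cons, pvStepA, if_neg hx]
      rw [ih _ _ hm]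
      simp [pvAux, hx]

lemma pvL2 : ∀ (xs : List Int) (p : Int), 0 ≤ p →
    max p (pvAux xs p) =
      max (p + ((xs.takeWhile (· == (1:Int))).length : Int)) (pvAux (xs.dropWhile (· == (1:Int))) 0) := by
  intro xs
  induction xs with
  | nil => intro p hp; simp [pvAux, max_eq_left hp]
  | cons x xs ih =>
    intro p hp
    by_cases hx : x = 1
    · have h1 : max p (pvAux (x :: xs) p) = max (p + 1) (pvAux xs (p + 1)) := by
        have h : max p (p + 1) = p + 1 := by omega
        rw [pvAux, if_pos hx, ← max_assoc, h]
      rw [h1, ih (p + 1) (by omega)]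
      simp [hx]
      ring_nf
    · simp [pvAux, hx]

lemma pvL3 : ∀ (xs : List Int), pvAux xs 0 = pvMaxRun xs := by
  intro xs
  induction xs using pvMaxRun.induct with
  | case1 => simp [pvAux, pvMaxRun]
  | case2 xs ih =>
    have h : pvAux (1 :: xs) 0 = max 1 (pvAux xs 1) := by norm_num [pvAux]
    rw [h, pvL2 xs 1 (by omega), ih]
    simp [pvMaxRun]
  | case3 x xs hx ih =>
    simp [pvAux, pvMaxRun, hx, ih]

lemma pvL4 : ∀ (arr : List (List Int)) (m : Int), 0 ≤ m →
    arr.foldl (fun max_point row => (row.foldl pvStepA (max_point, 0)).1) m =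
      arr.foldl (fun best row => max best (pvMaxRun row)) m := by
  intro arr
  induction arr with
  | nil => intro m _; rfl
  | cons row rows ih =>
    intro m hm
    simp only [List.foldl_cons]
    rw [pvL1 row m 0 hm, pvL3]
    exact ih _ (le_trans hm (le_max_left _ _))

-- ===== VERDICT (by name: the statement is the Claim_ definition above) =====
theorem check_one_spec : Claim_equal_check_one := by
  intro arr _
  unfold Spec_check_one check_one check_one_alt
  exact pvL4 arr 0 le_rfl
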